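-- pv_equiv track=rewrite | github.com/kharrigian/idtm | scripts/model/observed.py | batch_time_bin_assign
-- ===== SOURCE A (Python) =====
-- def batch_time_bin_assign(time_bounds,
--                           time_bins):
--     """
--     Args:
--         time_bounds (list of tuple): Lower, Upper Epoch Times
--         time_bins (list of tuple): Lower, Upper Time Bin Boundaries
--     """
--     ## Assign Original Indice
--     time_bounds_indexed = [(i, x, y) for i, (x, y) in enumerate(time_bounds)]
--     ## Sort Indexed Time Bins By Lower Bound
--     time_bounds_indexed = sorted(time_bounds_indexed, key=lambda x: x[1])
--     ## Initialize Counters and Cache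
--     m = 0
--     n = 0
--     M = len(time_bins)
--     N = len(time_bounds)
--     assignments = []
--     ## First Step: Assign Nulls to Bounds Before Time Bin Range
--     while n < N:
--         if time_bounds_indexed[n][2] < time_bins[m][0]:
--             assignments.append(None)
--             n += 1
--         else:
--             break
--     ## Second Step: Assign Bins in Batches
--     while n < N:
--         ## Get Time Range for Data Point
--         lower, upper = time_bounds_indexed[n][1], time_bounds_indexed[n][2]
--         ## Check to See If Data Point Falls Outside Max Range
--         if lower > time_bins[-1][0]:
--             assignments.append(None)
--             n += 1
--             continue
--         ## Increment Time Bins Until Reaching Lower Bound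
--         while m < M and time_bins[m][1] <= lower:
--             m += 1
--         ## Cache Assignment
--         assignments.append(m)
--         n += 1
--     ## Add Assignments With Index
--     assignments_indexed = [(x[0], y) for x, y in zip(time_bounds_indexed, assignments)]
--     ## Sort Assignments by Original Index
--     assignments_indexed = sorted(assignments_indexed, key=lambda x: x[0])
--     ## Isolate Assignments
--     assignments_indexed = [i[1] for i in assignments_indexed]
--     return assignments_indexed
-- ===== SOURCE B (Python) =====
-- def batch_time_bin_assign(time_bounds, time_bins):
--     """Map each (lower, upper) interval to the first bin whose upper boundary
--     lies beyond the interval's lower bound.  Intervals are scanned in order of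
--     their lower bound: assignment begins with the first scanned interval that
--     reaches the binned range, and an interval starting beyond the last bin's
--     lower boundary is left unassigned (None)."""
--     if not time_bounds:
--         return []
--     first_low, last_low = time_bins[0][0], time_bins[-1][0]
--     uppers = [upper for _, upper in time_bins]
--     assignment = [None] * len(time_bounds)
--     assigning = False
--     for i, (lower, upper) in sorted(enumerate(time_bounds), key=lambda t: t[1][0]):
--         if not assigning:
--             if upper < first_low:
--                 continue
--             assigning = True
--         if lower <= last_low:
--             assignment[i] = next((j for j, u in enumerate(uppers) if u > lower), len(uppers))
--     return assignment
-- ===== Notes on version B (the rewrite author's own statement) =====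
-- stated objective: alternative
-- what changed: Replaces A's two-loop merge with a threaded bin pointer plus zip/re-sort-by-index finishing passes by a single stateful sweep over the start-sorted intervals that writes a per-element first-covering-bin lookup straight into a preallocated result list at the original index.
import Mathlib
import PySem

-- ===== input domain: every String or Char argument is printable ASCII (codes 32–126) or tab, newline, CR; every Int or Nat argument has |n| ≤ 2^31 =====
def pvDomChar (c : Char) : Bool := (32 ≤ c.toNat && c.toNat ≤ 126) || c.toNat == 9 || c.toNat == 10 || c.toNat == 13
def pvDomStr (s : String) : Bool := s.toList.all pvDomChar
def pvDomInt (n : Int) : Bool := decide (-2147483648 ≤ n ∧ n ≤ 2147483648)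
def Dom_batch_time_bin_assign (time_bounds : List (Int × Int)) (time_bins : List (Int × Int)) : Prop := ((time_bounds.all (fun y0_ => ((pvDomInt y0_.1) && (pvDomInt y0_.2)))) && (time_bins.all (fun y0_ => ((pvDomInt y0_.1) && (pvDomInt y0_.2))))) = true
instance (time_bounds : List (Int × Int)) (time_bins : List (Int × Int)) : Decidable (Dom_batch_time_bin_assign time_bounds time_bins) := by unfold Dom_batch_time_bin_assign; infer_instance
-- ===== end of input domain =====

-- B replaces A's threaded merge pointer and zip/re-sort finishing passes with one stateful sweep
-- over the start-time-sorted intervals, writing per-element first-bin lookups into a preallocated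
-- list at the original index (alternative, same result).


-- ===== PORT A =====
-- inner while: `while m < M and time_bins[m][1] <= lower: m += 1`
def pvAdvance (bins : List (Int × Int)) (lower : Int) (m : Nat) : Nat :=
  if h : m < bins.length then
    if bins[m].2 ≤ lower then pvAdvance bins lower (m + 1) else m
  else m
termination_by bins.length - m

-- first while loop: Nones for the sorted prefix with upper < time_bins[0][0], returns (appended Nones, rest)
def pvPhase1 (bin0low : Int) : List (Int × Int × Int) → List (Option Int) × List (Int × Int × Int)
  | [] => ([], [])
  | t :: rest =>
    if t.2.2 < bin0low then
      let r := pvPhase1 bin0low rest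
      (none :: r.1, r.2)
    else ([], t :: rest)

-- second while loop, threading the pointer m
def pvPhase2 (bins : List (Int × Int)) (lastLow : Int) (m : Nat) : List (Int × Int × Int) → List (Option Int)
  | [] => []
  | t :: rest =>
    if t.2.1 > lastLow then none :: pvPhase2 bins lastLow m rest
    else
      let m' := pvAdvance bins t.2.1 m
      some (m' : Int) :: pvPhase2 bins lastLow m' rest

def batch_time_bin_assign (time_bounds : List (Int × Int)) (time_bins : List (Int × Int)) : List (Option Int) :=
  let tbi := PySem.List.sorted (PySem.List.enumerate time_bounds) (fun t => t.2.1) false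
  let p1 := pvPhase1 ((time_bins.headD (0, 0)).1) tbi
  let assignments := p1.1 ++ pvPhase2 time_bins ((time_bins.getLastD (0, 0)).1) 0 p1.2
  let assignments_indexed := (tbi.zip assignments).map (fun p => (p.1.1, p.2))
  (PySem.List.sorted assignments_indexed (fun p => p.1) false).map (fun p => p.2)

-- ===== PORT B =====
-- next((j for j, u in enumerate(uppers) if u > lower), len(uppers))
def pvFirstIdx (lower : Int) : List Int → Nat
  | [] => 0
  | u :: us => if u > lower then 0 else pvFirstIdx lower us + 1

def batch_time_bin_assign_alt (time_bounds : List (Int × Int)) (time_bins : List (Int × Int)) : List (Option Int) :=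
  if time_bounds.isEmpty then [] else
  let firstLow := (time_bins.headD (0, 0)).1
  let lastLow := (time_bins.getLastD (0, 0)).1
  let uppers := time_bins.map (fun b => b.2)
  let assignment : List (Option Int) := List.replicate time_bounds.length none
  -- the sweep's state is (assigning, assignment)
  ((PySem.List.sorted (PySem.List.enumerate time_bounds) (fun t => t.2.1) false).foldl
    (fun (st : Bool × List (Option Int)) t =>
      if st.1 = false ∧ t.2.2 < firstLow then st
      else (true, if t.2.1 ≤ lastLow
        then st.2.set t.1.toNat (some ((pvFirstIdx t.2.1 uppers : Nat) : Int)) else st.2))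
    (false, assignment)).2

-- ===== PRECONDITION & SPEC =====
-- Pre_ excludes exactly the inputs where Python A raises IndexError (time_bins = [] with
-- time_bounds ≠ []); Python B raises there too.
def Pre_batch_time_bin_assign (time_bounds : List (Int × Int)) (time_bins : List (Int × Int)) : Prop :=
  time_bounds = [] ∨ time_bins ≠ []
instance (time_bounds : List (Int × Int)) (time_bins : List (Int × Int)) : Decidable (Pre_batch_time_bin_assign time_bounds time_bins) := by unfold Pre_batch_time_bin_assign; infer_instance

def pvWitness_batch_time_bin_assign : (List (Int × Int)) × (List (Int × Int)) :=
  ([(0, 3), (10, 12), (-4, -2)], [(-1, 2), (2, 5), (5, 8)])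

def Spec_batch_time_bin_assign (time_bounds : List (Int × Int)) (time_bins : List (Int × Int)) (out : List (Option Int)) : Prop := out = batch_time_bin_assign_alt time_bounds time_bins
instance (time_bounds : List (Int × Int)) (time_bins : List (Int × Int)) (out : List (Option Int)) : Decidable (Spec_batch_time_bin_assign time_bounds time_bins out) := by unfold Spec_batch_time_bin_assign; infer_instance

-- ===== CLAIM (what is proved, stated in full; the proofs are below) =====
def Claim_equal_batch_time_bin_assign : Prop := ∀ (time_bounds : List (Int × Int)) (time_bins : List (Int × Int)), Dom_batch_time_bin_assign time_bounds time_bins → Pre_batch_time_bin_assign time_bounds time_bins → Spec_batch_time_bin_assign time_bounds time_bins (batch_time_bin_assign time_bounds time_bins)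

-- ===== LEMMAS AND PROOFS =====

-- number of leading sorted elements with upper < first bin's low (proof-only helper)
def pvCut (firstLow : Int) : List (Int × Int × Int) → Nat
  | [] => 0
  | t :: rest => if t.2.2 < firstLow then pvCut firstLow rest + 1 else 0

-- value finally assigned to original index i (proof-only helper)
def pvVal (tb bins : List (Int × Int)) (i : Nat) : Option Int :=
  if ((i : Int), tb.getD i (0, 0)) ∈
        (PySem.List.sorted (PySem.List.enumerate tb) (fun t => t.2.1) false).drop
          (pvCut ((bins.headD (0, 0)).1)
            (PySem.List.sorted (PySem.List.enumerate tb) (fun t => t.2.1) false))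
      ∧ (tb.getD i (0, 0)).1 ≤ (bins.getLastD (0, 0)).1
  then some ((pvFirstIdx (tb.getD i (0, 0)).1 (bins.map (fun b => b.2)) : Nat) : Int) else none

theorem pvAdvance_succ (b : Int × Int) (bs : List (Int × Int)) (l : Int) (m : Nat) :
    pvAdvance (b :: bs) l (m + 1) = pvAdvance bs l m + 1 := by
  induction hb : bs.length - m generalizing m with
  | zero =>
    have hnm : ¬ m < bs.length := by omega
    have hnm1 : ¬ m + 1 < (b :: bs).length := by simp; omega
    conv_lhs => rw [pvAdvance]
    conv_rhs => rw [pvAdvance]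
    rw [dif_neg hnm1, dif_neg hnm]
  | succ n ih =>
    have hm : m < bs.length := by omega
    have hm1 : m + 1 < (b :: bs).length := by simp; omega
    conv_lhs => rw [pvAdvance]
    conv_rhs => rw [pvAdvance]
    rw [dif_pos hm1, dif_pos hm]
    have hget : (b :: bs)[m + 1] = bs[m] := by simp
    rw [hget]
    split
    · exact ih (m + 1) (by omega)
    · rfl

theorem pvAdvance_zero_eq_firstIdx (bins : List (Int × Int)) (l : Int) :
    pvAdvance bins l 0 = pvFirstIdx l (bins.map (fun b => b.2)) := by
  induction bins with
  | nil => rw [pvAdvance]; simp [pvFirstIdx]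
  | cons b bs ih =>
    rw [pvAdvance]
    simp only [List.map_cons, pvFirstIdx, List.length_cons, Nat.zero_lt_succ, dif_pos,
      List.getElem_cons_zero]
    by_cases hb : b.2 ≤ l
    · simp [hb, show ¬ b.2 > l from by omega, pvAdvance_succ, ih]
    · simp [hb, show b.2 > l from by omega]

theorem pvAdvance_comp (bins : List (Int × Int)) (l1 l2 : Int) (h : l1 ≤ l2) (m : Nat) :
    pvAdvance bins l2 (pvAdvance bins l1 m) = pvAdvance bins l2 m := by
  induction hb : bins.length - m generalizing m with
  | zero =>
    have hnm : ¬ m < bins.length := by omega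
    have e1 : pvAdvance bins l1 m = m := by rw [pvAdvance, dif_neg hnm]
    rw [e1]
  | succ n ih =>
    have hm : m < bins.length := by omega
    by_cases h1 : bins[m].2 ≤ l1
    · have e1 : pvAdvance bins l1 m = pvAdvance bins l1 (m + 1) := by
        rw [pvAdvance, dif_pos hm, if_pos h1]
      have e2 : pvAdvance bins l2 m = pvAdvance bins l2 (m + 1) := by
        rw [pvAdvance, dif_pos hm, if_pos (le_trans h1 h)]
      rw [e1, e2, ih (m + 1) (by omega)]
    · have e1 : pvAdvance bins l1 m = m := by rw [pvAdvance, dif_pos hm, if_neg h1]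
      rw [e1]

theorem pvPhase2_map (bins : List (Int × Int)) (lastLow : Int) (m : Nat)
    (rest : List (Int × Int × Int)) (hs : rest.Pairwise (fun a b => a.2.1 ≤ b.2.1)) :
    pvPhase2 bins lastLow m rest
      = rest.map (fun t => if t.2.1 > lastLow then none
          else some ((pvAdvance bins t.2.1 m : Nat) : Int)) := by
  induction rest generalizing m with
  | nil => rfl
  | cons t rest ih =>
    rw [List.pairwise_cons] at hs
    rw [pvPhase2, List.map_cons]
    by_cases hl : t.2.1 > lastLow
    · rw [if_pos hl, if_pos hl, ih m hs.2]
    · rw [if_neg hl, if_neg hl]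
      show some ((pvAdvance bins t.2.1 m : Nat) : Int)
            :: pvPhase2 bins lastLow (pvAdvance bins t.2.1 m) rest = _
      congr 1
      rw [ih _ hs.2]
      refine List.map_congr_left (fun u hu => ?_)
      split
      · rfl
      · rw [pvAdvance_comp bins t.2.1 u.2.1 (hs.1 u hu) m]

theorem pvPhase1_eq (b0 : Int) (s : List (Int × Int × Int)) :
    pvPhase1 b0 s = (List.replicate (pvCut b0 s) none, s.drop (pvCut b0 s)) := by
  induction s with
  | nil => rfl
  | cons t rest ih =>
    rw [pvPhase1, pvCut]
    by_cases ht : t.2.2 < b0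
    · simp only [ht, if_pos, ih, List.replicate_succ, List.drop_succ_cons]
    · simp [ht]

theorem pvCut_le (b0 : Int) (s : List (Int × Int × Int)) : pvCut b0 s ≤ s.length := by
  induction s with
  | nil => simp [pvCut]
  | cons t rest ih => rw [pvCut]; split <;> simp; omega

theorem pv_zip_map {a b : Type} (l : List a) (g : a → b) :
    l.zip (l.map g) = l.map (fun x => (x, g x)) := by
  induction l with
  | nil => rfl
  | cons x xs ih => simp [ih]

-- every element of the sorted indexed list is (i, time_bounds[i])
theorem pv_mem_s (tb : List (Int × Int)) (t : Int × Int × Int)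
    (ht : t ∈ PySem.List.sorted (PySem.List.enumerate tb) (fun t => t.2.1) false) :
    ∃ i : Nat, ∃ h : i < tb.length, t = ((i : Int), tb[i]) := by
  rw [PySem.List.mem_sorted] at ht
  rcases (PySem.List.mem_enumerate_iff tb 0 t).mp ht with ⟨k, hk, hkt⟩
  exact ⟨k, hk, by simpa using hkt⟩

theorem pv_s_pairwise_ne (tb : List (Int × Int)) :
    (PySem.List.sorted (PySem.List.enumerate tb) (fun t => t.2.1) false).Pairwise
      (fun a b => a.1 ≠ b.1) := by
  have hperm : ((PySem.List.sorted (PySem.List.enumerate tb) (fun t => t.2.1) false).map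
      (fun t => t.1)).Perm ((PySem.List.enumerate tb).map (fun t => t.1)) :=
    (PySem.List.sorted_perm _ _ _).map _
  have henum : ((PySem.List.enumerate tb).map (fun t => t.1)).Nodup :=
    ((List.pairwise_map.mpr (PySem.List.pairwise_lt_enumerate tb 0)).imp ne_of_lt)
  have : ((PySem.List.sorted (PySem.List.enumerate tb) (fun t => t.2.1) false).map
      (fun t => t.1)).Nodup := hperm.nodup_iff.mpr henum
  exact List.pairwise_map.mp this

theorem pv_s_nodup (tb : List (Int × Int)) :
    (PySem.List.sorted (PySem.List.enumerate tb) (fun t => t.2.1) false).Nodup := by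
  exact (pv_s_pairwise_ne tb).imp (fun h e => h (congrArg (fun t => t.1) e))

-- characterization of B's write-back step, once the sweep is assigning
theorem pv_foldl_flag_true (firstLow lastLow : Int) (uppers : List Int)
    (l : List (Int × Int × Int)) (res : List (Option Int)) :
    l.foldl
      (fun (st : Bool × List (Option Int)) t =>
        if st.1 = false ∧ t.2.2 < firstLow then st
        else (true, if t.2.1 ≤ lastLow
          then st.2.set t.1.toNat (some ((pvFirstIdx t.2.1 uppers : Nat) : Int)) else st.2))
      (true, res)
      = (true, l.foldl
          (fun res t => if t.2.1 ≤ lastLow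
            then res.set t.1.toNat (some ((pvFirstIdx t.2.1 uppers : Nat) : Int)) else res)
          res) := by
  induction l generalizing res with
  | nil => rfl
  | cons t l ih =>
    rw [List.foldl_cons, if_neg (by simp), ih, List.foldl_cons]

-- B's sweep from the not-yet-assigning state = plain fold over the list with the prefix dropped
theorem pv_foldl_flag_false (firstLow lastLow : Int) (uppers : List Int)
    (l : List (Int × Int × Int)) (res : List (Option Int)) :
    (l.foldl
      (fun (st : Bool × List (Option Int)) t =>
        if st.1 = false ∧ t.2.2 < firstLow then st
        else (true, if t.2.1 ≤ lastLow
          then st.2.set t.1.toNat (some ((pvFirstIdx t.2.1 uppers : Nat) : Int)) else st.2))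
      (false, res)).2
      = (l.drop (pvCut firstLow l)).foldl
          (fun res t => if t.2.1 ≤ lastLow
            then res.set t.1.toNat (some ((pvFirstIdx t.2.1 uppers : Nat) : Int)) else res)
          res := by
  induction l generalizing res with
  | nil => rfl
  | cons t l ih =>
    rw [List.foldl_cons, pvCut]
    by_cases ht : t.2.2 < firstLow
    · rw [if_pos ht, if_pos ⟨rfl, ht⟩, List.drop_succ_cons, ih]
    · rw [if_neg ht, if_neg (fun h => ht h.2), List.drop_zero, List.foldl_cons,
        pv_foldl_flag_true]

-- characterization of B's write-back fold
theorem pv_foldl_set_getElem (lastLow : Int) (uppers : List Int)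
    (L : List (Int × Int × Int)) (res : List (Option Int))
    (hne : L.Pairwise (fun a b => a.1 ≠ b.1))
    (hnn : ∀ t ∈ L, 0 ≤ t.1)
    (hlt : ∀ t ∈ L, t.1.toNat < res.length) (j : Nat) :
    (L.foldl (fun res t => if t.2.1 ≤ lastLow
        then res.set t.1.toNat (some ((pvFirstIdx t.2.1 uppers : Nat) : Int)) else res) res)[j]?
      = match L.find? (fun t => t.1 == (j : Int)) with
        | some t => if t.2.1 ≤ lastLow then some (some ((pvFirstIdx t.2.1 uppers : Nat) : Int)) else res[j]?
        | none => res[j]? := by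
  induction L generalizing res with
  | nil => rfl
  | cons t L ih =>
    rw [List.pairwise_cons] at hne
    rw [List.foldl_cons]
    have h0 : (0 : Int) ≤ t.1 := hnn t (by simp)
    have ihres := ih (if t.2.1 ≤ lastLow
        then res.set t.1.toNat (some ((pvFirstIdx t.2.1 uppers : Nat) : Int)) else res)
      hne.2 (fun u hu => hnn u (by simp [hu]))
      (fun u hu => by
        have := hlt u (by simp [hu]); split <;> simpa using this)
    have hset : t.1.toNat ≠ j → ∀ (v : Option Int), (res.set t.1.toNat v)[j]? = res[j]? :=
      fun hne v => List.getElem?_set_ne hne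
    by_cases hj : t.1 = (j : Int)
    · rw [List.find?_cons_of_pos (p := fun u => u.1 == (j : Int)) (a := t) (l := L) (by simp [hj])]
      have hfind : L.find? (fun u => u.1 == (j : Int)) = none := by
        rw [List.find?_eq_none]
        intro u hu
        simp only [beq_iff_eq]
        rw [← hj]
        exact fun e => hne.1 u hu e.symm
      rw [ihres]
      simp only [hfind]
      have hjt : t.1.toNat = j := by omega
      split
      · rw [← hjt, List.getElem?_set_self (hlt t (by simp))]
      · rfl
    · rw [List.find?_cons_of_neg (p := fun u => u.1 == (j : Int)) (a := t) (l := L) (by simp [hj])]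
      rw [ihres]
      cases hf : List.find? (fun u => u.1 == (j : Int)) L with
      | none =>
        simp only [hf]
        split
        · exact hset (by omega) _
        · rfl
      | some u =>
        simp only [hf]
        by_cases hu : u.2.1 ≤ lastLow
        · rw [if_pos hu, if_pos hu]
        · rw [if_neg hu, if_neg hu]
          split
          · exact hset (by omega) _
          · rfl

theorem pv_enum_map (tb bins : List (Int × Int)) :
    (PySem.List.enumerate tb).map (fun t => (t.1, pvVal tb bins t.1.toNat))
      = (List.range tb.length).map (fun (i : Nat) => ((i : Int), pvVal tb bins i)) := by
  apply List.ext_getElem?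
  intro j
  by_cases hj : j < tb.length
  · rw [List.getElem?_map, List.getElem?_map, PySem.List.getElem?_enumerate,
      List.getElem?_eq_getElem hj, List.getElem?_range hj]
    simp
  · rw [List.getElem?_map, List.getElem?_map,
      List.getElem?_eq_none (l := PySem.List.enumerate tb)
        (by rw [PySem.List.length_enumerate]; omega),
      List.getElem?_eq_none (l := List.range tb.length) (by rw [List.length_range]; omega)]
    rfl

-- the two halves of A's indexed assignment list, as maps over the sorted list
theorem pv_pairs_eq (tb bins : List (Int × Int)) :
    (((PySem.List.sorted (PySem.List.enumerate tb) (fun t => t.2.1) false).zip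
        (List.replicate (pvCut ((bins.headD (0, 0)).1)
            (PySem.List.sorted (PySem.List.enumerate tb) (fun t => t.2.1) false)) none
          ++ ((PySem.List.sorted (PySem.List.enumerate tb) (fun t => t.2.1) false).drop
              (pvCut ((bins.headD (0, 0)).1)
                (PySem.List.sorted (PySem.List.enumerate tb) (fun t => t.2.1) false))).map
            (fun t => if t.2.1 > (bins.getLastD (0, 0)).1 then none
              else some ((pvFirstIdx t.2.1 (bins.map (fun b => b.2)) : Nat) : Int)))).map
        (fun p => (p.1.1, p.2)))
      = (PySem.List.sorted (PySem.List.enumerate tb) (fun t => t.2.1) false).map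
          (fun t => (t.1, pvVal tb bins t.1.toNat)) := by
  set S := PySem.List.sorted (PySem.List.enumerate tb) (fun t => t.2.1) false with hS
  set K := pvCut ((bins.headD (0, 0)).1) S with hK
  have hkle : K ≤ S.length := pvCut_le _ _
  have htk : (S.take K).length = K := by rw [List.length_take, Nat.min_eq_left hkle]
  have hrep : List.replicate K (none : Option Int) = (S.take K).map (fun _ => none) := by
    rw [List.map_const', htk]
  have hdisj : ∀ a ∈ S.take K, a ∉ S.drop K := fun a ha hb =>
    (List.nodup_append.mp (by rw [List.take_append_drop]; exact pv_s_nodup tb)).2.2 a ha a hb rfl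
  calc ((S.zip (List.replicate K none
          ++ (S.drop K).map (fun t => if t.2.1 > (bins.getLastD (0, 0)).1 then none
              else some ((pvFirstIdx t.2.1 (bins.map (fun b => b.2)) : Nat) : Int)))).map
        (fun p => (p.1.1, p.2)))
      = (((S.take K ++ S.drop K).zip ((S.take K).map (fun _ => none)
          ++ (S.drop K).map (fun t => if t.2.1 > (bins.getLastD (0, 0)).1 then none
              else some ((pvFirstIdx t.2.1 (bins.map (fun b => b.2)) : Nat) : Int)))).map
        (fun p => (p.1.1, p.2))) := by rw [List.take_append_drop, ← hrep]
    _ = ((S.take K).zip ((S.take K).map (fun _ => none))).map (fun p => (p.1.1, p.2))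
          ++ ((S.drop K).zip ((S.drop K).map (fun t => if t.2.1 > (bins.getLastD (0, 0)).1 then none
              else some ((pvFirstIdx t.2.1 (bins.map (fun b => b.2)) : Nat) : Int)))).map
            (fun p => (p.1.1, p.2)) := by
        rw [List.zip_append (by rw [htk, List.length_map, htk]), List.map_append]
    _ = (S.take K).map (fun t => (t.1, (none : Option Int)))
          ++ (S.drop K).map (fun t => (t.1, if t.2.1 > (bins.getLastD (0, 0)).1 then none
              else some ((pvFirstIdx t.2.1 (bins.map (fun b => b.2)) : Nat) : Int))) := by
        rw [pv_zip_map, pv_zip_map, List.map_map, List.map_map]; rfl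
    _ = (S.take K).map (fun t => (t.1, pvVal tb bins t.1.toNat))
          ++ (S.drop K).map (fun t => (t.1, pvVal tb bins t.1.toNat)) := by
        congr 1
        · refine List.map_congr_left (fun t ht => ?_)
          obtain ⟨i, hi, rfl⟩ := pv_mem_s tb t (List.mem_of_mem_take ht)
          simp only [pvVal, Int.toNat_natCast, ← hS, ← hK]
          rw [List.getD_eq_getElem tb (0, 0) hi]
          rw [if_neg (fun hc => hdisj _ ht hc.1)]
        · refine List.map_congr_left (fun t ht => ?_)
          obtain ⟨i, hi, rfl⟩ := pv_mem_s tb t (List.mem_of_mem_drop ht)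
          simp only [pvVal, Int.toNat_natCast, ← hS, ← hK]
          rw [List.getD_eq_getElem tb (0, 0) hi]
          by_cases hc : tb[i].1 ≤ (bins.getLastD (0, 0)).1
          · rw [if_pos (show _ ∧ _ from ⟨ht, hc⟩), if_neg (by simpa using hc)]
          · rw [if_neg (show ¬ (_ ∧ _) from fun hx => hc hx.2), if_pos (by simpa using hc)]
    _ = S.map (fun t => (t.1, pvVal tb bins t.1.toNat)) := by
        rw [← List.map_append, List.take_append_drop]

-- A's result, rewritten as a map over the original indices
theorem pvA_eq (tb bins : List (Int × Int)) :
    batch_time_bin_assign tb bins = (List.range tb.length).map (fun i => pvVal tb bins i) := by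
  have hA : batch_time_bin_assign tb bins
      = (PySem.List.sorted
          (((PySem.List.sorted (PySem.List.enumerate tb) (fun t => t.2.1) false).zip
            (List.replicate (pvCut ((bins.headD (0, 0)).1)
                (PySem.List.sorted (PySem.List.enumerate tb) (fun t => t.2.1) false)) none
              ++ pvPhase2 bins ((bins.getLastD (0, 0)).1) 0
                  ((PySem.List.sorted (PySem.List.enumerate tb) (fun t => t.2.1) false).drop
                    (pvCut ((bins.headD (0, 0)).1)
                      (PySem.List.sorted (PySem.List.enumerate tb) (fun t => t.2.1) false))))).map
            (fun p => (p.1.1, p.2)))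
          (fun p => p.1) false).map (fun p => p.2) := by
    simp only [batch_time_bin_assign, pvPhase1_eq]
  rw [hA]
  rw [pvPhase2_map bins _ 0 _
    (List.Pairwise.sublist (List.drop_sublist _ _) (PySem.List.sorted_pairwise _ _))]
  simp only [pvAdvance_zero_eq_firstIdx]
  rw [pv_pairs_eq]
  have hperm : ((List.range tb.length).map (fun (i : Nat) => ((i : Int), pvVal tb bins i))).Perm
      ((PySem.List.sorted (PySem.List.enumerate tb) (fun t => t.2.1) false).map
        (fun t => (t.1, pvVal tb bins t.1.toNat))) := by
    rw [← pv_enum_map]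
    exact ((PySem.List.sorted_perm _ _ _).map _).symm
  have hpw : ((List.range tb.length).map (fun (i : Nat) => ((i : Int), pvVal tb bins i))).Pairwise
      (fun a b => a.1 < b.1) := by
    refine List.pairwise_map.mpr (List.pairwise_lt_range.imp ?_)
    intro a b h
    simpa using h
  rw [PySem.List.sorted_eq_of_perm_of_pairwise_lt _ _ (fun p => p.1) hperm hpw]
  simp

-- B's result, rewritten the same way
theorem pvB_eq (tb bins : List (Int × Int)) :
    batch_time_bin_assign_alt tb bins = (List.range tb.length).map (fun i => pvVal tb bins i) := by
  by_cases htb : tb.isEmpty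
  · rw [List.isEmpty_iff] at htb; subst htb; rfl
  · have hB : batch_time_bin_assign_alt tb bins
        = ((PySem.List.sorted (PySem.List.enumerate tb) (fun t => t.2.1) false).drop
            (pvCut ((bins.headD (0, 0)).1)
              (PySem.List.sorted (PySem.List.enumerate tb) (fun t => t.2.1) false))).foldl
          (fun res t => if t.2.1 ≤ (bins.getLastD (0, 0)).1
            then res.set t.1.toNat
              (some ((pvFirstIdx t.2.1 (bins.map (fun b => b.2)) : Nat) : Int)) else res)
          (List.replicate tb.length none) := by
      simp only [batch_time_bin_assign_alt, if_neg htb]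
      rw [pv_foldl_flag_false]
    rw [hB]
    have hmem : ∀ t ∈ (PySem.List.sorted (PySem.List.enumerate tb) (fun t => t.2.1) false).drop
        (pvCut ((bins.headD (0, 0)).1)
          (PySem.List.sorted (PySem.List.enumerate tb) (fun t => t.2.1) false)),
        ∃ i : Nat, ∃ h : i < tb.length, t = ((i : Int), tb[i]) :=
      fun t ht => pv_mem_s tb t (List.mem_of_mem_drop ht)
    apply List.ext_getElem?
    intro j
    rw [pv_foldl_set_getElem _ _ _ _
      (List.Pairwise.sublist (List.drop_sublist _ _) (pv_s_pairwise_ne tb))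
      (fun t ht => by obtain ⟨i, hi, rfl⟩ := hmem t ht; simp)
      (fun t ht => by obtain ⟨i, hi, rfl⟩ := hmem t ht; simpa using hi)]
    by_cases hj : j < tb.length
    · rw [List.getElem?_map, List.getElem?_range hj]
      simp only [Option.map_some]
      split
      · next t hf =>
        have htmem := List.mem_of_find?_eq_some hf
        have htj : t.1 = (j : Int) := by simpa using List.find?_some hf
        obtain ⟨i, hi, heq⟩ := hmem t htmem
        subst heq
        have hij : i = j := by simp at htj; omega
        subst hij
        simp only [pvVal]
        rw [List.getD_eq_getElem tb (0, 0) hi]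
        by_cases hc : tb[i].1 ≤ (bins.getLastD (0, 0)).1
        · rw [if_pos hc, if_pos (show _ ∧ _ from ⟨htmem, hc⟩)]
        · rw [if_neg hc, if_neg (show ¬ (_ ∧ _) from fun hx => hc hx.2)]
          simp [hi]
      · next hf =>
        have hnm : pvVal tb bins j = none := by
          simp only [pvVal]
          rw [if_neg]
          intro hc
          have := List.find?_eq_none.mp hf _ hc.1
          simp at this
        rw [hnm]
        simp [hj]
    · rw [List.getElem?_map,
        List.getElem?_eq_none (show (List.range tb.length).length ≤ j by
          rw [List.length_range]; omega)]
      split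
      · next t hf =>
        exfalso
        obtain ⟨i, hi, heq⟩ := hmem t (List.mem_of_find?_eq_some hf)
        subst heq
        have : ((i : Int)) = (j : Int) := by simpa using List.find?_some hf
        omega
      · next hf =>
        rw [List.getElem?_eq_none (by rw [List.length_replicate]; omega)]
        rfl

-- ===== VERDICT (by name: the statement is the Claim_ definition above) =====
theorem batch_time_bin_assign_spec : Claim_equal_batch_time_bin_assign := by
  intro tb bins _ _
  unfold Spec_batch_time_bin_assign
  rw [pvA_eq, pvB_eq]
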